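-- pv_equiv track=rewrite | github.com/saint2706/Pro-g-rammingChallenges4 | challenges/Algorithmic/Sierpinski/triangle.py | generate_sierpinski_lines
-- ===== SOURCE A (Python) =====
-- from typing import Iterable, List, Optional, Sequence
--
-- def generate_sierpinski_lines(size: int, char: str = "*") -> List[str]:
--     """Generate lines for a Sierpinski triangle of given size.
--
--     Returns a list of strings (each line without trailing spaces) suitable
--     for printing or further processing.
--     """
--     lines: List[str] = []
--     for y in range(size):
--         calc_y = size - 1 - y  # invert for upright orientation
--         line_chars: List[str] = []
--         # Leading spaces for centering (each symbol plus trailing space counts width ~2)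
--         line_chars.append(" " * y)
--         for x in range(size - y):
--             if (x & calc_y) == 0:
--                 line_chars.append(char)
--                 line_chars.append(" ")  # spacing for visual proportion
--             else:
--                 line_chars.append("  ")
--         lines.append("".join(line_chars).rstrip())
--     return lines
-- ===== SOURCE B (Python) =====
-- from typing import List
--
--
-- def generate_sierpinski_lines(size: int, char: str = "*") -> List[str]:
--     """Generate lines for a Sierpinski triangle of given size.
--
--     Instead of the per-cell bitwise (x & calc_y) == 0 test, build the Pascal's
--     triangle parity rows as integer bitmasks with the XOR recurrence
--     m_next = m ^ (m << 1) (bit k of row n is C(n, k) mod 2), render each row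
--     once as a binary string, and read a cell as 'on' iff C(x + calc_y, x) is
--     odd.  Row n has n + 1 binary digits (msb first), so bit x of row
--     n = x + calc_y is the digit at position calc_y.
--     """
--     masks: List[int] = []
--     m = 1
--     for _ in range(2 * size - 1):
--         masks.append(m)
--         m ^= m << 1
--     bits = [format(v, "b") for v in masks]
--     lines: List[str] = []
--     on = char + " "
--     for y in range(size):
--         calc_y = size - 1 - y
--         row = [on if bits[x + calc_y][calc_y] == "1" else "  "
--                for x in range(size - y)]
--         lines.append("".join([" " * y] + row).rstrip())
--     return lines
-- ===== Notes on version B (the rewrite author's own statement) =====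
-- stated objective: alternative
-- what changed: B replaces the per-cell bitwise (x & calc_y) == 0 test with precomputed Pascal's-triangle parity rows kept as integer bitmasks via the XOR recurrence m ^= m << 1, rendered once per row as binary strings whose digit at position calc_y decides each cell (Lucas/Kummer at p = 2).
import Mathlib
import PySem

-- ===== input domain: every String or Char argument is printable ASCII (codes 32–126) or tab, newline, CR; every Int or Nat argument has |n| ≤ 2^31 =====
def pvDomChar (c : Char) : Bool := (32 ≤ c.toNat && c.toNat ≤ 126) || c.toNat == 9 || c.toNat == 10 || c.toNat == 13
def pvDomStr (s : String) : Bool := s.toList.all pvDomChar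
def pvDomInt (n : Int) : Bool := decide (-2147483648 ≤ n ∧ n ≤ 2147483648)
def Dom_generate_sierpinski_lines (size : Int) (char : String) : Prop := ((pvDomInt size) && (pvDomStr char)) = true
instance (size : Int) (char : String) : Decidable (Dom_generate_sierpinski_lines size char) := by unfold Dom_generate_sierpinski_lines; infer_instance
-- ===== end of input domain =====

-- B replaces the bitwise (x & calc_y) == 0 cell test by a precomputed Pascal's-triangle
-- parity table (XOR recurrence): an alternative algorithm of similar cost, not faster.


-- ===== PORT A =====
-- one iteration of A's row loop (body of 'for y in range(size)')
def pvRowA (size : Int) (char : String) (y : Int) : String :=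
  let calc_y := size - 1 - y
  let line_chars : List (List Char) := [PySem.List.pyRepeat [' '] y]
  let line_chars := (PySem.List.pyRange 0 (size - y) 1).foldl
      (fun lc x => if PySem.Int.band x calc_y = 0 then lc ++ [char.toList, [' ']]
                   else lc ++ [[' ', ' ']]) line_chars
  String.mk (PySem.Chars.rstrip (PySem.Chars.join [] line_chars))

def generate_sierpinski_lines (size : Int) (char : String) : List String :=
  (PySem.List.pyRange 0 size 1).foldl (fun lines y => lines ++ [pvRowA size char y]) []

-- ===== PORT B =====
-- the mask-building loop: for _ in range(2*size-1): masks.append(m); m ^= m << 1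
def pvMasks (size : Int) : List Int :=
  ((PySem.List.pyRange 0 (2 * size - 1) 1).foldl
    (fun (st : List Int × Int) _ => (st.1 ++ [st.2], PySem.Int.bxor st.2 (st.2 <<< (1 : Nat))))
    ([], 1)).1

-- body of B's row loop; bits[x + calc_y] and its character at calc_y are always
-- in range here, so List.getD / Str.pyGet? are exact for Python's indexing
def pvRowB (bits : List String) (on : List Char) (size : Int) (y : Int) : String :=
  let calc_y := size - 1 - y
  let row : List (List Char) := (PySem.List.pyRange 0 (size - y) 1).map
      (fun x => if PySem.Str.pyGet? (bits.getD (x + calc_y).toNat "") calc_y = some '1'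
                then on else [' ', ' '])
  String.mk (PySem.Chars.rstrip (PySem.Chars.join [] ([PySem.List.pyRepeat [' '] y] ++ row)))

def generate_sierpinski_lines_alt (size : Int) (char : String) : List String :=
  let bits := (pvMasks size).map PySem.Int.toBin
  let on := char.toList ++ [' ']
  (PySem.List.pyRange 0 size 1).foldl
    (fun lines y => lines ++ [pvRowB bits on size y]) []

-- ===== PRECONDITION & SPEC =====
def Spec_generate_sierpinski_lines (size : Int) (char : String) (out : List String) : Prop := out = generate_sierpinski_lines_alt size char
instance (size : Int) (char : String) (out : List String) : Decidable (Spec_generate_sierpinski_lines size char out) := by unfold Spec_generate_sierpinski_lines; infer_instance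

-- ===== CLAIM (what is proved, stated in full; the proofs are below) =====
def Claim_equal_generate_sierpinski_lines : Prop := ∀ (size : Int) (char : String), Dom_generate_sierpinski_lines size char → Spec_generate_sierpinski_lines size char (generate_sierpinski_lines size char)

-- ===== LEMMAS AND PROOFS =====

-- bit-shift identities for Nat.land
theorem pvLand00 (a b : Nat) : 2 * a &&& 2 * b = 2 * (a &&& b) := by
  simpa [Nat.bit] using Nat.land_bit false a false b

theorem pvLand11 (a b : Nat) : 2 * a + 1 &&& (2 * b + 1) = 2 * (a &&& b) + 1 := by
  simpa [Nat.bit] using Nat.land_bit true a true b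

theorem pvLand10 (a b : Nat) : 2 * a + 1 &&& 2 * b = 2 * (a &&& b) := by
  simpa [Nat.bit] using Nat.land_bit true a false b

theorem pvLand01 (a b : Nat) : 2 * a &&& (2 * b + 1) = 2 * (a &&& b) := by
  simpa [Nat.bit] using Nat.land_bit false a true b

-- the XOR recurrence of the parity indicator (Lucas/Kummer at p = 2)
theorem pvLandRec : ∀ (s k m : Nat), k + m ≤ s → 1 ≤ k → 1 ≤ m →
    (if k &&& m = 0 then (1 : Int) else 0)
      = PySem.Int.bxor (if (k - 1) &&& m = 0 then (1 : Int) else 0)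
                       (if k &&& (m - 1) = 0 then (1 : Int) else 0) := by
  intro s
  induction s with
  | zero => intro k m hs hk hm; omega
  | succ s ih =>
    intro k m hs hk hm
    rcases Nat.even_or_odd k with ⟨a, ha⟩ | ⟨a, ha⟩ <;>
      rcases Nat.even_or_odd m with ⟨b, hb⟩ | ⟨b, hb⟩
    · -- k = 2a, m = 2b, a,b ≥ 1
      have ha2 : k = 2 * a := by omega
      have hb2 : m = 2 * b := by omega
      subst ha2; subst hb2
      rw [show 2 * a - 1 = 2 * (a - 1) + 1 by omega,
        show 2 * b - 1 = 2 * (b - 1) + 1 by omega,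
        pvLand00, pvLand10, pvLand01]
      have := ih a b (by omega) (by omega) (by omega)
      simpa [Nat.mul_eq_zero] using this
    · -- k = 2a even, m = 2b+1 odd
      have ha2 : k = 2 * a := by omega
      have hb2 : m = 2 * b + 1 := by omega
      subst ha2; subst hb2
      rw [show 2 * a - 1 = 2 * (a - 1) + 1 by omega,
        show 2 * b + 1 - 1 = 2 * b by omega, pvLand01, pvLand11, pvLand00]
      simp only [Nat.mul_eq_zero]
      split_ifs <;> simp_all <;> decide
    · -- k = 2a+1 odd, m = 2b even
      have ha2 : k = 2 * a + 1 := by omega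
      have hb2 : m = 2 * b := by omega
      subst ha2; subst hb2
      rw [show 2 * b - 1 = 2 * (b - 1) + 1 by omega,
        show 2 * a + 1 - 1 = 2 * a by omega, pvLand10, pvLand00, pvLand11]
      simp only [Nat.mul_eq_zero]
      split_ifs <;> simp_all <;> decide
    · -- both odd
      have ha2 : k = 2 * a + 1 := by omega
      have hb2 : m = 2 * b + 1 := by omega
      subst ha2; subst hb2
      rw [show 2 * a + 1 - 1 = 2 * a by omega, show 2 * b + 1 - 1 = 2 * b by omega,
        pvLand11, pvLand01, pvLand10]
      split_ifs <;> simp_all <;> decide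

-- Bool form of the recurrence
theorem pvLandRecB (k m : Nat) (hk : 1 ≤ k) (hm : 1 ≤ m) :
    decide (k &&& m = 0)
      = (decide ((k - 1) &&& m = 0)).xor (decide (k &&& (m - 1) = 0)) := by
  have h := pvLandRec (k + m) k m (le_refl _) hk hm
  by_cases h1 : k &&& m = 0 <;> by_cases h2 : (k - 1) &&& m = 0 <;>
    by_cases h3 : k &&& (m - 1) = 0 <;> simp [h1, h2, h3] at h ⊢ <;>
    revert h <;> decide

def pvNatMask : Nat → Nat
  | 0 => 1
  | n + 1 => pvNatMask n ^^^ (pvNatMask n <<< 1)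

theorem pvMask_testBit : ∀ n k, (pvNatMask n).testBit k
    = decide (k ≤ n ∧ k &&& (n - k) = 0) := by
  intro n
  induction n with
  | zero =>
    intro k
    cases k with
    | zero => decide
    | succ j => simp [pvNatMask, Nat.testBit_succ]
  | succ n ih =>
    intro k
    rw [pvNatMask, Nat.testBit_xor, Nat.testBit_shiftLeft, ih k]
    cases k with
    | zero => simp [Nat.zero_and]
    | succ j =>
      rw [show j + 1 - 1 = j by omega, ih j]
      simp only [ge_iff_le, Nat.le_add_left, decide_true, Bool.true_and]
      by_cases hj : j + 1 ≤ n
      · have hrec := pvLandRecB (j + 1) (n - j) (by omega) (by omega)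
        rw [show (j + 1) - 1 = j by omega, show n - j - 1 = n - (j + 1) by omega] at hrec
        have e1 : decide (j + 1 ≤ n ∧ (j + 1) &&& (n - (j + 1)) = 0)
            = decide ((j + 1) &&& (n - (j + 1)) = 0) := by simp [hj]
        have e2 : decide (j ≤ n ∧ j &&& (n - j) = 0) = decide (j &&& (n - j) = 0) := by
          simp [show j ≤ n by omega]
        have e3 : decide (j + 1 ≤ n + 1 ∧ (j + 1) &&& (n + 1 - (j + 1)) = 0)
            = decide ((j + 1) &&& (n - j) = 0) := by
          simp [show j + 1 ≤ n + 1 by omega, show n + 1 - (j + 1) = n - j by omega]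
        rw [e1, e2, e3, hrec, Bool.xor_comm]
      · by_cases hj2 : j = n
        · subst hj2
          simp [Nat.sub_self, Nat.and_zero, show ¬ (j + 1 ≤ j) by omega]
        · have h1 : ¬ (j + 1 ≤ n) := hj
          have h2 : ¬ (j ≤ n) := by omega
          have h3 : ¬ (j + 1 ≤ n + 1) := by omega
          simp [h1, h2, h3]

theorem pvMask_lt (n : Nat) : pvNatMask n < 2 ^ (n + 1) := by
  induction n with
  | zero => decide
  | succ n ih =>
    rw [pvNatMask]
    have h1 : pvNatMask n < 2 ^ (n + 2) := lt_of_lt_of_le ih (by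
      exact Nat.pow_le_pow_right (by omega) (by omega))
    have h2 : pvNatMask n <<< 1 < 2 ^ (n + 2) := by
      rw [Nat.shiftLeft_eq]
      have e : 2 ^ (n + 2) = 2 ^ (n + 1) * 2 := by ring
      have e1 : 2 ^ 1 = 2 := by norm_num
      rw [e1, e]
      omega
    exact Nat.xor_lt_two_pow h1 h2

theorem pvMask_ge (n : Nat) : 2 ^ n ≤ pvNatMask n := by
  have h : (pvNatMask n).testBit n = true := by
    rw [pvMask_testBit]; simp
  exact Nat.ge_two_pow_of_testBit h

-- msb-first binary digits, as Nat.toDigits 2 produces them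
def pvBin (n : Nat) : List Char :=
  if h : n < 2 then [Nat.digitChar n]
  else pvBin (n / 2) ++ [Nat.digitChar (n % 2)]
decreasing_by exact Nat.div_lt_self (by omega) (by omega)

theorem pvToDigitsCore : ∀ (f n : Nat) (ds : List Char), n < 2 ^ (f + 1) →
    Nat.toDigitsCore 2 (f + 1) n ds = pvBin n ++ ds := by
  intro f
  induction f with
  | zero =>
    intro n ds h
    have hn : n < 2 := by simpa using h
    rw [Nat.toDigitsCore]
    simp only [show n / 2 = 0 by omega, if_pos rfl]
    rw [pvBin]
    simp [show n % 2 = n by omega, hn]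
  | succ f ih =>
    intro n ds h
    rw [Nat.toDigitsCore]
    by_cases h0 : n / 2 = 0
    · simp only [h0, if_pos rfl]
      rw [pvBin]
      have hn : n < 2 := by omega
      simp [show n % 2 = n by omega, hn]
    · simp only [h0, if_neg h0]
      have hlt : n / 2 < 2 ^ (f + 1) := by
        have e : 2 ^ (f + 1 + 1) = 2 * 2 ^ (f + 1) := by ring
        omega
      rw [ih (n / 2) _ hlt]
      have hge : ¬ n < 2 := by omega
      conv_rhs => rw [pvBin]
      rw [dif_neg hge]
      simp

theorem pvRevRangeMap {α : Type} (f : Nat → α) (m : Nat) :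
    (List.range (m + 1)).reverse.map f
      = ((List.range m).reverse.map (f ∘ Nat.succ)) ++ [f 0] := by
  rw [List.range_succ_eq_map]
  simp [List.map_reverse, List.map_map]

theorem pvBin_eq : ∀ (L n : Nat), 2 ^ L ≤ n → n < 2 ^ (L + 1) →
    pvBin n = (List.range (L + 1)).reverse.map
      (fun j => if n.testBit j then '1' else '0') := by
  intro L
  induction L with
  | zero =>
    intro n h1 h2
    have : n = 1 := by simpa using (by omega : n = 1)
    subst this
    rw [pvBin]
    decide
  | succ L ih =>
    intro n h1 h2
    have hge : ¬ n < 2 := by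
      have : (2:Nat) ≤ 2 ^ (L + 1) := by
        have := Nat.one_le_two_pow (n := L)
        calc (2:Nat) = 2 * 1 := by norm_num
        _ ≤ 2 * 2 ^ L := by omega
        _ = 2 ^ (L + 1) := by ring
      omega
    rw [pvBin, dif_neg hge]
    have hd1 : 2 ^ L ≤ n / 2 := by
      have e : 2 ^ (L + 1) = 2 ^ L * 2 := by ring
      omega
    have hd2 : n / 2 < 2 ^ (L + 1) := by
      have e : 2 ^ (L + 1 + 1) = 2 ^ (L + 1) * 2 := by ring
      omega
    rw [ih (n / 2) hd1 hd2]
    conv_rhs => rw [pvRevRangeMap]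
    congr 1
    · refine List.map_congr_left ?_
      intro j _
      simp only [Function.comp_apply]
      rw [Nat.testBit_succ]
    · have ht : n.testBit 0 = decide (n % 2 = 1) := by
        simp [Nat.testBit_zero]
      rcases Nat.mod_two_eq_zero_or_one n with hm | hm <;>
        simp [ht, hm, Nat.digitChar]

theorem pvToDigits_bin (M : Nat) : Nat.toDigits 2 M = pvBin M := by
  have h : M < 2 ^ (M + 1) :=
    lt_of_lt_of_le Nat.lt_two_pow_self (Nat.pow_le_pow_right (by omega) (by omega))
  have := pvToDigitsCore M M [] h
  simpa [Nat.toDigits] using this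

theorem pvCell (a c : Nat) :
    (PySem.Str.pyGet? (PySem.Int.toBin ((pvNatMask (a + c) : Nat) : Int)) ((c : Nat) : Int)
        = some '1') ↔ (a &&& c = 0) := by
  have hM0 : (0 : Int) ≤ ((pvNatMask (a + c) : Nat) : Int) := by positivity
  have htl : (PySem.Int.toBin ((pvNatMask (a + c) : Nat) : Int)).toList
      = Nat.toDigits 2 (pvNatMask (a + c)) := by
    rw [PySem.Int.toList_toBin, PySem.Int.toBinChars]
    simp
  have hbin : Nat.toDigits 2 (pvNatMask (a + c))
      = (List.range (a + c + 1)).reverse.map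
          (fun j => if (pvNatMask (a + c)).testBit j then '1' else '0') := by
    rw [pvToDigits_bin]
    exact pvBin_eq (a + c) _ (pvMask_ge _) (pvMask_lt _)
  rw [PySem.Str.pyGet?_natCast, htl, hbin]
  rw [List.getElem?_map]
  have hlen : (List.range (a + c + 1)).reverse.length = a + c + 1 := by simp
  have hrev : (List.range (a + c + 1)).reverse[c]? = some a := by
    rw [List.getElem?_reverse (by simpa using (show c < a + c + 1 by omega))]
    simp only [List.length_range]
    rw [List.getElem?_range (by omega)]
    congr 1
    omega
  rw [hrev]
  simp only [Option.map_some]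
  rw [pvMask_testBit]
  have he : decide (a ≤ a + c ∧ a &&& (a + c - a) = 0) = decide (a &&& c = 0) := by
    simp [show a + c - a = c by omega]
  rw [he]
  by_cases hz : a &&& c = 0 <;> simp [hz]


-- the fold invariant of the mask-building loop
theorem pvFoldM : ∀ (l : List Int) (k : Nat),
    (l.foldl (fun (st : List Int × Int) _ => (st.1 ++ [st.2], PySem.Int.bxor st.2 (st.2 <<< (1 : Nat))))
      ((List.range k).map (fun j => ((pvNatMask j : Nat) : Int)), ((pvNatMask k : Nat) : Int))).1
    = (List.range (k + l.length)).map (fun j => ((pvNatMask j : Nat) : Int)) := by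
  intro l
  induction l with
  | nil => intro k; simp
  | cons x t ih =>
    intro k
    simp only [List.foldl_cons]
    have h1 : (List.range k).map (fun j => ((pvNatMask j : Nat) : Int))
        ++ [((pvNatMask k : Nat) : Int)]
        = (List.range (k + 1)).map (fun j => ((pvNatMask j : Nat) : Int)) := by
      rw [List.range_succ, List.map_append]; rfl
    have h2 : PySem.Int.bxor ((pvNatMask k : Nat) : Int) (((pvNatMask k : Nat) : Int) <<< (1 : Nat))
        = ((pvNatMask (k + 1) : Nat) : Int) := by
      rw [← Int.natCast_shiftLeft, PySem.Int.bxor_natCast]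
      rfl
    rw [h1, h2, ih (k + 1)]
    have h3 : k + 1 + t.length = k + (x :: t).length := by simp; omega
    rw [h3]

-- the masks built by the fold are the Pascal parity rows
theorem pvMasks_eq (size : Int) :
    pvMasks size = (List.range (2 * size - 1).toNat).map (fun j => ((pvNatMask j : Nat) : Int)) := by
  unfold pvMasks
  have h0 : (([], 1) : List Int × Int)
      = ((List.range 0).map (fun j => ((pvNatMask j : Nat) : Int)), ((pvNatMask 0 : Nat) : Int)) := by
    simp [pvNatMask]
  rw [h0, pvFoldM]
  congr 1
  simp [PySem.List.length_pyRange_one]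

theorem joinNil (ls : List (List Char)) : PySem.Chars.join [] ls = ls.flatten := by
  simp [PySem.Chars.join, List.intercalate]
  induction ls with
  | nil => simp
  | cons x t ih => cases t <;> simp_all

theorem flattenFlatMap {α β : Type} (g : α → List (List β)) (l : List α) :
    (l.flatMap g).flatten = l.flatMap (fun x => (g x).flatten) := by
  induction l with
  | nil => simp
  | cons x t ih => simp [ih]

-- A's bit test agrees with B's binary-digit lookup at every visited cell
theorem pvCond_eq (size x y : Int) (hy0 : 0 ≤ y) (hy1 : y < size)
    (hx0 : 0 ≤ x) (hx1 : x < size - y) :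
    (PySem.Int.band x (size - 1 - y) = 0)
      ↔ (PySem.Str.pyGet?
          (((pvMasks size).map PySem.Int.toBin).getD (x + (size - 1 - y)).toNat "")
          (size - 1 - y) = some '1') := by
  have hc0 : 0 ≤ size - 1 - y := by omega
  have hband := PySem.Int.band_of_nonneg hx0 hc0
  have ha : (x.toNat : Int) = x := Int.toNat_of_nonneg hx0
  have hc : ((size - 1 - y).toNat : Int) = size - 1 - y := Int.toNat_of_nonneg hc0
  have hL : (((2 * size - 1).toNat : Int)) = 2 * size - 1 := Int.toNat_of_nonneg (by omega)
  have hsum : (x + (size - 1 - y)).toNat = x.toNat + (size - 1 - y).toNat :=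
    Int.toNat_add hx0 hc0
  have hn : x.toNat + (size - 1 - y).toNat < (2 * size - 1).toNat := by omega
  rw [hband, hsum, pvMasks_eq, List.map_map,
    PySem.List.getD_map_range _ ((2 * size - 1).toNat)
      (x.toNat + (size - 1 - y).toNat) "" hn]
  simp only [Function.comp_apply]
  rw [← hc]
  simp only [Int.toNat_natCast]
  rw [pvCell x.toNat (size - 1 - y).toNat]
  constructor
  · intro h
    exact Int.natCast_eq_zero.mp h
  · intro h
    simp [h]

-- a row of A equals the corresponding row of B
theorem pvRow_eq (size : Int) (char : String) (y : Int) (hy0 : 0 ≤ y) (hy1 : y < size) :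
    pvRowA size char y
      = pvRowB ((pvMasks size).map PySem.Int.toBin) (char.toList ++ [' ']) size y := by
  simp only [pvRowA, pvRowB]
  have hA : (fun (lc : List (List Char)) (x : Int) =>
      if PySem.Int.band x (size - 1 - y) = 0 then lc ++ [char.toList, [' ']]
      else lc ++ [[' ', ' ']])
      = (fun lc x => lc ++ (if PySem.Int.band x (size - 1 - y) = 0
          then [char.toList, [' ']] else [[' ', ' ']])) := by
    funext lc x; split_ifs <;> rfl
  rw [hA, PySem.List.foldl_append_eq_flatMap]
  refine congrArg String.mk (congrArg PySem.Chars.rstrip ?_)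
  rw [joinNil, joinNil]
  simp only [List.flatten_append]
  rw [flattenFlatMap, List.flatMap_def]
  refine congrArg (fun t => [PySem.List.pyRepeat [' '] y].flatten ++ t)
    (congrArg List.flatten (List.map_congr_left ?_))
  intro x hx
  rw [PySem.List.mem_pyRange_one] at hx
  have hc := pvCond_eq size x y hy0 hy1 hx.1 hx.2
  by_cases h : PySem.Int.band x (size - 1 - y) = 0
  · rw [if_pos h, if_pos (hc.mp h)]; simp
  · rw [if_neg h, if_neg (fun hb => h (hc.mpr hb))]; simp

-- ===== VERDICT (by name: the statement is the Claim_ definition above) =====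
theorem generate_sierpinski_lines_spec : Claim_equal_generate_sierpinski_lines := by
  intro size char _
  unfold Spec_generate_sierpinski_lines generate_sierpinski_lines
  simp only [generate_sierpinski_lines_alt]
  rw [PySem.List.foldl_append_singleton_eq_map, PySem.List.foldl_append_singleton_eq_map]
  simp only [List.nil_append]
  refine List.map_congr_left ?_
  intro y hy
  rw [PySem.List.mem_pyRange_one] at hy
  exact pvRow_eq size char y hy.1 hy.2
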